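-- pv_equiv track=rewrite | github.com/Yuming018/Data_consistency | kappa.py | count_paragraph
-- ===== SOURCE A (Python) =====
-- def count_paragraph(data, repeat_label_story):
--     temp = set()
--     for i in range(len(data)):
--         if data[i][1]:
--             label = data[i][0] + ' ' + data[i][1].split(' - ')[0]
--         elif data[i][2]:
--             label = data[i][0] + ' ' + data[i][2].split(' - ')[0]
--         if label in temp:
--             repeat_label_story.add(data[i][0])
--         temp.add(label)
--     return repeat_label_story
-- ===== SOURCE B (Python) =====
-- def count_paragraph(data, repeat_label_story):
--     # Phase 1: compute each row's label (same branch logic, label carries over).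
--     labels = []
--     label = None
--     for story, f1, f2 in data:
--         if f1:
--             label = story + ' ' + f1.split(' - ')[0]
--         elif f2:
--             label = story + ' ' + f2.split(' - ')[0]
--         labels.append(label)
--     # Phase 2: first-occurrence index of every label.
--     first = {}
--     for i, l in enumerate(labels):
--         if l not in first:
--             first[l] = i
--     # Phase 3: every non-first occurrence of a label marks its story id.
--     for i, ((story, _, _), l) in enumerate(zip(data, labels)):
--         if first[l] != i:
--             repeat_label_story.add(story)
--     return repeat_label_story
-- ===== Notes on version B (the rewrite author's own statement) =====
-- stated objective: alternative
-- what changed: A's incremental seen-set single pass is replaced by a three-phase decomposition: build the per-row label list (same carry-over branch logic), index each label's first occurrence in a dict, then a collection pass that marks every non-first occurrence; same O(n) cost.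
import Mathlib
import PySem

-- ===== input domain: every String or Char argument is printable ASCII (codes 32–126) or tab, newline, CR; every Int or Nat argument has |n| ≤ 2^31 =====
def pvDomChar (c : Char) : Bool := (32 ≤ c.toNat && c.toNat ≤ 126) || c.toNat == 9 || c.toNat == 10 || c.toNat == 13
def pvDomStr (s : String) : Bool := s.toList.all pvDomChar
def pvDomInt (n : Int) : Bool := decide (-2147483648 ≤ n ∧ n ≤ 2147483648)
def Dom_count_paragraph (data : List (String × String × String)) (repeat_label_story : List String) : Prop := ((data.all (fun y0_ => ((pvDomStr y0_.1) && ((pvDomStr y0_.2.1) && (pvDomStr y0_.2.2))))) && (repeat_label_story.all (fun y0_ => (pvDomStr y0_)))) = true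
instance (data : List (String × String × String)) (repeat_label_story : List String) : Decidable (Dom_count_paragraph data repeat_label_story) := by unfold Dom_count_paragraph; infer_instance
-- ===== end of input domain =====

-- B replaces A's incremental seen-set single pass by a three-phase decomposition (labels list,
-- first-occurrence index, collection pass); objective: alternative. The Python A mutates the passed-in
-- set (B performs the identical mutation); the theorems are about the returned value.
-- Both programs compute a row's label by the same branch logic (shared helper below); the `label`
-- variable carries over to rows whose both fields are empty (Option, none = Python's unbound `label`).
def pvMkLabel (story f1 f2 : String) (label : Option String) : Option String :=
  -- f.split(' - ')[0]: split? is none only for sep = "", never here; [0] exists (split? yields ≥ 1 piece)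
  if f1 ≠ "" then some (story ++ " " ++ (((PySem.Str.split? f1 " - ").getD []).headD ""))
  else if f2 ≠ "" then some (story ++ " " ++ (((PySem.Str.split? f2 " - ").getD []).headD ""))
  else label

-- ===== PORT A =====
-- A's single loop: temp = labels seen so far; a repeated label adds its story id to the result set.
def pvLoopA : List (String × String × String) → PySem.Set (Option String) → Option String → List String → List String
  | [], _, _, res => res
  | (story, f1, f2) :: rest, temp, label, res =>
    pvLoopA rest (PySem.Set.add temp (pvMkLabel story f1 f2 label)) (pvMkLabel story f1 f2 label)
      (if PySem.Set.contains temp (pvMkLabel story f1 f2 label) then PySem.Set.add res story else res)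

def count_paragraph (data : List (String × String × String)) (repeat_label_story : List String) : List String :=
  pvLoopA data PySem.Set.empty none repeat_label_story

-- ===== PORT B =====
-- Phase 1: the list of row labels (same branch logic, label carried across rows).
def pvLabels : List (String × String × String) → Option String → List (Option String)
  | [], _ => []
  | (story, f1, f2) :: rest, label =>
    pvMkLabel story f1 f2 label :: pvLabels rest (pvMkLabel story f1 f2 label)

-- Phase 2: dict label → index of its first occurrence ('if l not in first: first[l] = i').
def pvFirstGo : List (Option String) → Int → PySem.Dict (Option String) Int → PySem.Dict (Option String) Int
  | [], _, d => d
  | l :: rest, i, d => pvFirstGo rest (i + 1) (if d.contains l then d else d.insert l i)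

-- Phase 3: every non-first occurrence of a label adds its story id to the set.
-- 'first[l]' is ported as getD with an unused default: every l of the zip is a key of first.
def pvCollect : List ((String × String × String) × Option String) → Int → PySem.Dict (Option String) Int → List String → List String
  | [], _, _, res => res
  | (t, l) :: rest, i, first, res =>
    pvCollect rest (i + 1) first (if first.getD l (-1) ≠ i then PySem.Set.add res t.1 else res)

def count_paragraph_alt (data : List (String × String × String)) (repeat_label_story : List String) : List String :=
  let labels := pvLabels data none
  let first := pvFirstGo labels 0 PySem.Dict.empty
  pvCollect (data.zip labels) 0 first repeat_label_story

-- ===== PRECONDITION & SPEC =====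
-- Pre_ excludes exactly the inputs where A raises UnboundLocalError: a first row whose both text
-- fields are empty (no `label` has been bound yet).
def Pre_count_paragraph (data : List (String × String × String)) (repeat_label_story : List String) : Prop :=
  (data.head?.all (fun t => t.2.1 != "" || t.2.2 != "")) = true
instance (data : List (String × String × String)) (repeat_label_story : List String) : Decidable (Pre_count_paragraph data repeat_label_story) := by unfold Pre_count_paragraph; infer_instance

def pvWitness_count_paragraph : (List (String × String × String)) × List String :=
  ([("a", "x - y", ""), ("b", "x - z", ""), ("a", "", "x - q")], [])

def Spec_count_paragraph (data : List (String × String × String)) (repeat_label_story : List String) (out : List String) : Prop := out = count_paragraph_alt data repeat_label_story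
instance (data : List (String × String × String)) (repeat_label_story : List String) (out : List String) : Decidable (Spec_count_paragraph data repeat_label_story out) := by unfold Spec_count_paragraph; infer_instance

-- ===== CLAIM (what is proved, stated in full; the proofs are below) =====
def Claim_equal_count_paragraph : Prop := ∀ (data : List (String × String × String)) (repeat_label_story : List String), Dom_count_paragraph data repeat_label_story → Pre_count_paragraph data repeat_label_story → Spec_count_paragraph data repeat_label_story (count_paragraph data repeat_label_story)

-- ===== LEMMAS AND PROOFS =====

-- Phase-2 characterisation: the first-occurrence dict looks up the index of the first occurrence
-- (shifted by the running counter i), keys already present win.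
lemma pvFirstGo_get? (labs : List (Option String)) (i : Int) (d : PySem.Dict (Option String) Int) (l : Option String) :
    (pvFirstGo labs i d).get? l =
      (d.get? l).or ((PySem.List.index? labs l).map (fun n => i + (n : Int))) := by
  induction labs generalizing i d with
  | nil =>
    simp [pvFirstGo, PySem.List.index?_eq_idxOf?]
  | cons l0 rest ih =>
    simp only [pvFirstGo]
    rw [ih]
    by_cases hl : l = l0
    · subst hl
      rw [PySem.List.index?_cons_self]
      by_cases hc : d.contains l
      · rcases h : d.get? l with _ | v
        · exact absurd ((PySem.Dict.get?_eq_none_iff_contains d l).mp h) (by simp [hc])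
        · simp [hc, h]
      · have h0 : d.get? l = none :=
          (PySem.Dict.get?_eq_none_iff_contains d l).mpr (by simpa using hc)
        simp [hc, h0, PySem.Dict.get?_insert_self]
    · have hne : l0 ≠ l := fun he => hl he.symm
      rw [PySem.List.index?_cons_of_ne rest hne]
      by_cases hc : d.contains l0
      · rcases hr : PySem.List.index? rest l with _ | n
        · simp [hc]
        · simp only [hc, if_pos]
          have : (i + 1) + (n : Int) = i + ((n + 1 : Nat) : Int) := by push_cast; ring
          simp [this]
      · rw [if_neg (by simpa using hc)]
        rw [PySem.Dict.get?_insert_of_ne _ _ hl]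
        rcases hr : PySem.List.index? rest l with _ | n
        · simp
        · rcases h : d.get? l with _ | v
          · simp only [Option.or]
            have : (i + 1) + (n : Int) = i + ((n + 1 : Nat) : Int) := by push_cast; ring
            simp [this]
          · simp

-- Main invariant: A's loop over the remaining rows, with `temp` holding exactly the labels of the
-- processed prefix, equals B's collection pass driven by the first-occurrence dict of the full list.
lemma pvLoop_eq_collect (rows : List (String × String × String)) (pre : List (Option String))
    (label : Option String) (res : List String) (first : PySem.Dict (Option String) Int)
    (hfirst : ∀ l, first.get? l = (PySem.List.index? (pre ++ pvLabels rows label) l).map (fun n => (n : Int))) :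
    pvLoopA rows (PySem.Set.ofList pre) label res
      = pvCollect (rows.zip (pvLabels rows label)) (pre.length : Int) first res := by
  induction rows generalizing pre label res with
  | nil => simp [pvLoopA, pvLabels, pvCollect]
  | cons row rest ih =>
    obtain ⟨story, f1, f2⟩ := row
    simp only [pvLoopA, pvLabels, List.zip_cons_cons, pvCollect]
    generalize hlgen : pvMkLabel story f1 f2 label = l
    have hidx : first.get? l
        = (PySem.List.index? (pre ++ (l :: pvLabels rest l)) l).map (fun n => (n : Int)) := by
      rw [hfirst l]; simp only [pvLabels]; rw [hlgen]
    -- the two branch conditions agree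
    have hcond : (first.getD l (-1) ≠ (pre.length : Int)) ↔ l ∈ pre := by
      constructor
      · intro hne
        by_contra hmem
        have hsome : PySem.List.index? (pre ++ (l :: pvLabels rest l)) l = some pre.length :=
          (PySem.List.index?_eq_some_iff _ _ _).mpr ⟨pre, pvLabels rest l, rfl, rfl, hmem⟩
        rw [hsome] at hidx
        exact hne (by rw [PySem.Dict.getD_of_get?_eq_some _ _ hidx])
      · intro hmem
        rw [PySem.List.index?_append_of_mem (l :: pvLabels rest l) hmem] at hidx
        obtain ⟨k, hk⟩ := Option.isSome_iff_exists.mp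
          ((PySem.List.index?_isSome_iff pre l).mpr hmem)
        obtain ⟨hklt, -, -⟩ := PySem.List.getElem_of_index?_eq_some hk
        rw [hk] at hidx
        simp at hidx
        rw [PySem.Dict.getD_of_get?_eq_some _ _ hidx]
        intro habs
        omega
    have hmemset : PySem.Set.contains (PySem.Set.ofList pre) l = true ↔ l ∈ pre := by
      rw [PySem.Set.contains_iff, PySem.Set.mem_ofList]
    have hbr : (if PySem.Set.contains (PySem.Set.ofList pre) l then PySem.Set.add res story else res)
        = (if first.getD l (-1) ≠ (pre.length : Int) then PySem.Set.add res story else res) := by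
      by_cases hmem : l ∈ pre
      · rw [if_pos (hmemset.mpr hmem), if_pos (hcond.mpr hmem)]
      · rw [if_neg (fun h => hmem (hmemset.mp h)), if_neg (fun h => hmem (hcond.mp h))]
    rw [hbr, ← PySem.Set.ofList_append_singleton pre l]
    have hstep := ih (pre ++ [l]) l
      (if first.getD l (-1) ≠ (pre.length : Int) then PySem.Set.add res story else res)
      (by
        intro l'
        rw [hfirst l']
        simp only [pvLabels]
        rw [hlgen, List.append_assoc]
        simp)
    rw [hstep]
    have hlen : ((pre ++ [l]).length : Int) = (pre.length : Int) + 1 := by simp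
    rw [hlen]

-- ===== VERDICT (by name: the statement is the Claim_ definition above) =====
theorem count_paragraph_spec : Claim_equal_count_paragraph := by
  unfold Claim_equal_count_paragraph
  intro data rls _ _
  unfold Spec_count_paragraph count_paragraph count_paragraph_alt
  have h := pvLoop_eq_collect data [] none rls (pvFirstGo (pvLabels data none) 0 PySem.Dict.empty)
    (by
      intro l
      rw [pvFirstGo_get?]
      simp [PySem.Dict.get?_empty])
  simpa using h
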